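-- pv_equiv track=rewrite | github.com/dbyrne/ClawTheSpire | sts2-solver/src/sts2_solver/data_loader.py | _upgrade_power_amount
-- ===== SOURCE A (Python) =====
-- def _upgrade_power_amount(
--     powers: list[tuple[str, int]], power_name: str, delta: int
-- ) -> list[tuple[str, int]]:
--     """Find a power by name and increase its amount."""
--     result = []
--     found = False
--     for name, amount in powers:
--         if name == power_name and not found:
--             result.append((name, amount + delta))
--             found = True
--         else:
--             result.append((name, amount))
--     return result
-- ===== SOURCE B (Python) =====
-- def _upgrade_power_amount(
--     powers: list[tuple[str, int]], power_name: str, delta: int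
-- ) -> list[tuple[str, int]]:
--     """Find a power by name and increase its amount (locate + slice splice)."""
--     i = next((j for j, (name, _) in enumerate(powers) if name == power_name), None)
--     if i is None:
--         return list(powers)
--     return powers[:i] + [(powers[i][0], powers[i][1] + delta)] + powers[i + 1:]
-- ===== Notes on version B (the rewrite author's own statement) =====
-- stated objective: simpler
-- what changed: Replaces the element-by-element append loop with a found flag by a two-phase locate-then-splice: find the index of the first match, then concatenate powers[:i], the updated pair, and powers[i+1:].
import Mathlib
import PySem

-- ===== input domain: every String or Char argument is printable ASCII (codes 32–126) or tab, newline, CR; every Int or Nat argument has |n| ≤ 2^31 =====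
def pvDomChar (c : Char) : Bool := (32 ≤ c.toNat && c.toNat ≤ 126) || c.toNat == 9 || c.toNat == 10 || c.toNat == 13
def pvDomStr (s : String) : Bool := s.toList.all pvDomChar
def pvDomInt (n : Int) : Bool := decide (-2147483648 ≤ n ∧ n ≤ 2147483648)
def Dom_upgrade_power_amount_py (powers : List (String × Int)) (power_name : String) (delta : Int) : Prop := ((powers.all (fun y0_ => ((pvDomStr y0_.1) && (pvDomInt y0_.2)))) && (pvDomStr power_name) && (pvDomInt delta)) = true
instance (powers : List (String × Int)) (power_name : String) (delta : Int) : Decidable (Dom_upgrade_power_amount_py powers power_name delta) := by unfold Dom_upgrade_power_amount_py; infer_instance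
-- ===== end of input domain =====

-- B replaces A's append loop with a found flag by a locate-then-splice (find first matching index, then take/update/drop concatenation); objective: simpler decomposition, same O(n) cost.


-- ===== PORT A =====
-- Port of A: one pass appending to `result` with a `found` flag (loop body = pvStepA).
def pvStepA (power_name : String) (delta : Int) (st : List (String × Int) × Bool) (p : String × Int) : List (String × Int) × Bool :=
  match p with
  | (name, amount) =>
    if name == power_name && !st.2 then (st.1 ++ [(name, amount + delta)], true)
    else (st.1 ++ [(name, amount)], st.2)

def upgrade_power_amount_py (powers : List (String × Int)) (power_name : String) (delta : Int) : List (String × Int) :=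
  (powers.foldl (pvStepA power_name delta) (([] : List (String × Int)), false)).1

-- ===== PORT B =====
-- Port of B: locate the first matching index, then splice by slice concatenation.
def upgrade_power_amount_py_alt (powers : List (String × Int)) (power_name : String) (delta : Int) : List (String × Int) :=
  match powers.findIdx? (fun p => p.1 == power_name) with
  | none => powers
  | some i =>
    match powers[i]? with
    | none => powers  -- unreachable totality guard: findIdx? returns an in-range index
    | some p => powers.take i ++ [(p.1, p.2 + delta)] ++ powers.drop (i + 1)

-- ===== PRECONDITION & SPEC =====
def Spec_upgrade_power_amount_py (powers : List (String × Int)) (power_name : String) (delta : Int) (out : List (String × Int)) : Prop := out = upgrade_power_amount_py_alt powers power_name delta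
instance (powers : List (String × Int)) (power_name : String) (delta : Int) (out : List (String × Int)) : Decidable (Spec_upgrade_power_amount_py powers power_name delta out) := by unfold Spec_upgrade_power_amount_py; infer_instance

-- ===== CLAIM (what is proved, stated in full; the proofs are below) =====
def Claim_equal_upgrade_power_amount_py : Prop := ∀ (powers : List (String × Int)) (power_name : String) (delta : Int), Dom_upgrade_power_amount_py powers power_name delta → Spec_upgrade_power_amount_py powers power_name delta (upgrade_power_amount_py powers power_name delta)

-- ===== LEMMAS AND PROOFS =====

theorem pvA_loop_true (power_name : String) (delta : Int) (l : List (String × Int)) :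
    ∀ acc : List (String × Int),
    l.foldl (pvStepA power_name delta) (acc, true) = (acc ++ l, true) := by
  induction l with
  | nil => intro acc; simp
  | cons h t ih =>
    intro acc
    obtain ⟨name, amount⟩ := h
    rw [List.foldl_cons]
    have hs : pvStepA power_name delta (acc, true) (name, amount) = (acc ++ [(name, amount)], true) := by
      simp [pvStepA]
    rw [hs, ih]
    simp

theorem pvA_loop_false (power_name : String) (delta : Int) (l : List (String × Int)) :
    ∀ acc : List (String × Int),
    (l.foldl (pvStepA power_name delta) (acc, false)).1
      = acc ++ upgrade_power_amount_py_alt l power_name delta := by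
  induction l with
  | nil => intro acc; simp [upgrade_power_amount_py_alt]
  | cons h t ih =>
    intro acc
    obtain ⟨name, amount⟩ := h
    rw [List.foldl_cons]
    by_cases hm : name == power_name
    · have hs : pvStepA power_name delta (acc, false) (name, amount)
          = (acc ++ [(name, amount + delta)], true) := by simp [pvStepA, hm]
      rw [hs, pvA_loop_true]
      simp only [upgrade_power_amount_py_alt, List.findIdx?_cons, hm]
      simp
    · have hs : pvStepA power_name delta (acc, false) (name, amount)
          = (acc ++ [(name, amount)], false) := by simp [pvStepA, hm]
      rw [hs, ih]
      simp only [upgrade_power_amount_py_alt, List.findIdx?_cons, hm]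
      cases hfi : t.findIdx? (fun p => p.1 == power_name) with
      | none => simp
      | some i =>
        simp only [Option.map_some]
        cases hg : t[i]? with
        | none => simp [hg]
        | some p => simp [hg, List.take_succ_cons, List.drop_succ_cons]

-- ===== VERDICT (by name: the statement is the Claim_ definition above) =====
theorem upgrade_power_amount_py_spec : Claim_equal_upgrade_power_amount_py := by
  intro powers power_name delta _hdom
  unfold Spec_upgrade_power_amount_py upgrade_power_amount_py
  simpa using pvA_loop_false power_name delta powers []
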